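-- pv_equiv track=rewrite | github.com/Pranaythumati/Assignments | python/4. Arrays.py | count_evnodd
-- ===== SOURCE A (Python) =====
-- def count_evnodd(arr):
--     even=0
--     odd=0
--     for i in range(0, len(arr)):
--         if i % 2 == 0 and i !=0:
--             even +=1
--         elif i%2 != 0 and i !=0:
--             odd +=1
--     return (f"the count of even numbers is {even} and odd numbers is {odd}")
-- ===== SOURCE B (Python) =====
-- def count_evnodd(arr):
--     m = max(len(arr) - 1, 0)
--     even = m // 2
--     odd = (m + 1) // 2
--     return (f"the count of even numbers is {even} and odd numbers is {odd}")
-- ===== Notes on version B (the rewrite author's own statement) =====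
-- stated objective: simpler
-- what changed: Replaced the loop over all indices with a closed-form computation of the two counts from the array length (even = (n-1)//2, odd = n//2 for nonempty arrays), no iteration at all.
import Mathlib
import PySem

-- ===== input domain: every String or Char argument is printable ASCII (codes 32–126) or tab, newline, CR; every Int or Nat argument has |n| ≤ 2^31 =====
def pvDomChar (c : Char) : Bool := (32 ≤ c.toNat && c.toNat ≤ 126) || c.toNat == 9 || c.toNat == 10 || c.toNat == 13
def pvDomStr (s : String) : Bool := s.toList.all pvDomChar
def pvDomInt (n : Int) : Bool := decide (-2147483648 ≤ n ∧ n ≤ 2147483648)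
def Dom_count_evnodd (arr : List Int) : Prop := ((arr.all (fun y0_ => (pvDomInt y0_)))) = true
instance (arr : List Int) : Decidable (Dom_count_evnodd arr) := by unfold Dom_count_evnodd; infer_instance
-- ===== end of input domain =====

-- B replaces A's loop over all indices with a closed-form computation of both counts from the length (O(1) vs O(n)).


-- ===== PORT A =====
def count_evnodd (arr : List Int) : String :=
  let st := (PySem.List.pyRange 0 (arr.length : Int) 1).foldl
    (fun (p : Int × Int) i =>
      if PySem.Int.mod i 2 = 0 ∧ i ≠ 0 then (p.1 + 1, p.2)
      else if PySem.Int.mod i 2 ≠ 0 ∧ i ≠ 0 then (p.1, p.2 + 1)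
      else p) (0, 0)
  "the count of even numbers is " ++ PySem.Int.toStr st.1 ++
    " and odd numbers is " ++ PySem.Int.toStr st.2

-- ===== PORT B =====
def count_evnodd_alt (arr : List Int) : String :=
  let m : Int := max ((arr.length : Int) - 1) 0
  let even := PySem.Int.floordiv m 2
  let odd := PySem.Int.floordiv (m + 1) 2
  "the count of even numbers is " ++ PySem.Int.toStr even ++
    " and odd numbers is " ++ PySem.Int.toStr odd

-- ===== PRECONDITION & SPEC =====
def Spec_count_evnodd (arr : List Int) (out : String) : Prop := out = count_evnodd_alt arr
instance (arr : List Int) (out : String) : Decidable (Spec_count_evnodd arr out) := by unfold Spec_count_evnodd; infer_instance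

-- ===== CLAIM (what is proved, stated in full; the proofs are below) =====
def Claim_equal_count_evnodd : Prop := ∀ (arr : List Int), Dom_count_evnodd arr → Spec_count_evnodd arr (count_evnodd arr)

-- ===== LEMMAS AND PROOFS =====

-- The loop of A over range(0, n) yields the closed-form pair ((n-1)//2 counts, n//2 counts).
theorem pv_loop_closed (n : ℕ) :
    (PySem.List.pyRange 0 (n : Int) 1).foldl
      (fun (p : Int × Int) i =>
        if PySem.Int.mod i 2 = 0 ∧ i ≠ 0 then (p.1 + 1, p.2)
        else if PySem.Int.mod i 2 ≠ 0 ∧ i ≠ 0 then (p.1, p.2 + 1)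
        else p) (0, 0)
    = (PySem.Int.floordiv (max ((n : Int) - 1) 0) 2,
       PySem.Int.floordiv (max ((n : Int) - 1) 0 + 1) 2) := by
  induction n with
  | zero => decide
  | succ k ih =>
    have h : (0 : Int) ≤ (k : Int) := Int.natCast_nonneg k
    have hsplit : ((k : ℕ) + 1 : ℕ) = ((k : Int) + 1) := by push_cast; ring
    rw [show ((k + 1 : ℕ) : Int) = (k : Int) + 1 by push_cast; ring,
        PySem.List.pyRange_one_succ_right h, List.foldl_append, ih]
    simp only [List.foldl_cons, List.foldl_nil]
    rcases Nat.even_or_odd k with ⟨m, hm⟩ | ⟨m, hm⟩ <;> subst hm <;>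
      rcases Nat.eq_zero_or_pos m with rfl | hm0 <;>
      · simp only [PySem.Int.mod, PySem.Int.floordiv,
          Int.fmod_eq_emod_of_nonneg _ (by norm_num : (0:Int) ≤ 2),
          Int.fdiv_eq_ediv_of_nonneg _ (by norm_num : (0:Int) ≤ 2)]
        split_ifs <;> simp only [Prod.mk.injEq, max_def] <;> split_ifs <;> push_cast <;> first | omega | exact ⟨trivial, trivial⟩

theorem pv_spec : ∀ (arr : List Int), count_evnodd arr = count_evnodd_alt arr := by
  intro arr
  unfold count_evnodd count_evnodd_alt
  rw [pv_loop_closed arr.length]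

-- ===== VERDICT (by name: the statement is the Claim_ definition above) =====
theorem count_evnodd_spec : Claim_equal_count_evnodd := by
  intro arr _
  unfold Spec_count_evnodd
  exact pv_spec arr
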